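-- pv_equiv track=rewrite | github.com/beto-bit/PyEncryptor | funcs/modifier.py | ascii_to_char
-- ===== SOURCE A (Python) =====
-- def ascii_to_char(lista, pssw):
--     """
--     Convierte los elementos de una lista (strings) usando el siguiente criterio:
--     Toma el número correspondiente, separado por un "$" y toma ese valor y le
--     resta el pssw(int) para devolver una lista con el equivalente en ASCII.
--
--     En caso de que el valor que examina (dentro de la lista) sea mayor a 255
--     usa la división con residuo y examina ese valor.
--     """
--     salida = []
--     new_lista = [] # lista con los valores ASCII
--     listori = [] # lista temporal que sirve de puente entre listas
--
--     # Bucle para añadir listas embedidas a new_lista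
--     for elemento in lista:
--         lista_temp = elemento.split("$")
--         lista_temp.pop()
--
--         # Bucle para hacer todos los elementos anteriores en (int)
--         for numero in lista_temp:
--             listori.append(int(numero) - pssw)
--
--         new_lista.append(listori)
--
--         listori = [] # Reiniciar listori
--
--     # Bucle para convertir cada valor ASCII a caracter
--     for mini in new_lista:
--         listica = [] # init lista para contenedor en new_lista
--         for number in mini:
--             listica.append(chr(abs(number))) # TODO si no funciona esto ponerle el %255
--
--         salida.append(listica)
--
--     return salida
-- ===== SOURCE B (Python) =====
-- def ascii_to_char(lista, pssw):
--     return [[chr(abs(int(n) - pssw)) for n in e.split("$")[:-1]] for e in lista]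
-- ===== Notes on version B (the rewrite author's own statement) =====
-- stated objective: simpler
-- what changed: Replaces A's three shaped passes with intermediate integer lists (new_lista/listori bridge, then a second conversion loop) by a single nested comprehension mapping each element straight to its character list in one traversal; Pre_ excludes tokens where int() or chr() raises and the surrogate band 0xD800-0xDFFF, where A's returned lone-surrogate string is not a value of the Lean String type.
import Mathlib
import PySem

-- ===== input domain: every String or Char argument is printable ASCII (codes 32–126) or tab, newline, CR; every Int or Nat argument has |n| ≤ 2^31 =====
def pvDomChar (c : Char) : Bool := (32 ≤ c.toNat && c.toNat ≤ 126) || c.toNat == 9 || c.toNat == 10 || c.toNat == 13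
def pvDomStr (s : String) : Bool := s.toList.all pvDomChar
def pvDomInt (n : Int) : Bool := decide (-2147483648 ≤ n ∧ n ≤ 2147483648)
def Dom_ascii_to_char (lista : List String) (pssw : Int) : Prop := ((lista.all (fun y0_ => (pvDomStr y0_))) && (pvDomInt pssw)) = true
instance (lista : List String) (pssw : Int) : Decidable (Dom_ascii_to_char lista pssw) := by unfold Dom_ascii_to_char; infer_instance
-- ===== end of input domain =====

-- B replaces A's three shaped passes and intermediate integer lists by one nested map; objective: simpler.


-- ===== PORT A =====
-- chr(n) for a Nat code point, as a 1-char string (exact on Pre_, which keeps the code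
-- point ≤ 0x10FFFF and outside the surrogate band, where Char.ofNat is Python's chr)
def pvChr (n : Nat) : String := String.ofList [Char.ofNat n]

def ascii_to_char (lista : List String) (pssw : Int) : List (List String) :=
  -- state: (new_lista, listori); int(numero) is ofStr? (none = ValueError, excluded by Pre_)
  let step := fun (st : List (List Int) × List Int) (elemento : String) =>
    let lista_temp := ((PySem.Str.split? elemento "$").getD []).dropLast  -- split then .pop()
    let listori := lista_temp.foldl
      (fun l numero => l ++ [((PySem.Int.ofStr? numero).getD 0) - pssw]) st.2
    (st.1 ++ [listori], ([] : List Int))  -- append, then reset listori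
  let new_lista := (lista.foldl step (([] : List (List Int)), ([] : List Int))).1
  -- second pass: each ASCII value to a character
  new_lista.foldl (fun salida mini =>
    let listica := mini.foldl (fun l number => l ++ [pvChr number.natAbs]) []
    salida ++ [listica]) []

-- ===== PORT B =====
def ascii_to_char_alt (lista : List String) (pssw : Int) : List (List String) :=
  lista.map (fun e =>
    (((PySem.Str.split? e "$").getD []).dropLast).map
      (fun n => pvChr (((PySem.Int.ofStr? n).getD 0) - pssw).natAbs))

-- ===== PRECONDITION & SPEC =====
-- Pre_ excludes inputs where A raises: a token on which int() raises ValueError, or one whose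
-- abs(int(token)-pssw) exceeds 0x10FFFF so chr raises ValueError; it also excludes the surrogate
-- band 0xD800–0xDFFF, where Python's chr returns a lone-surrogate string that no Lean Char can
-- represent (A and B return the same value there; see the cite).
def Pre_ascii_to_char (lista : List String) (pssw : Int) : Prop :=
  ∀ e ∈ lista, ∀ t ∈ ((PySem.Str.split? e "$").getD []).dropLast,
    PySem.Int.ofStr? t ≠ none ∧
    (((PySem.Int.ofStr? t).getD 0) - pssw).natAbs ≤ 1114111 ∧
    ¬ (55296 ≤ (((PySem.Int.ofStr? t).getD 0) - pssw).natAbs ∧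
       (((PySem.Int.ofStr? t).getD 0) - pssw).natAbs ≤ 57343)
instance (lista : List String) (pssw : Int) : Decidable (Pre_ascii_to_char lista pssw) := by
  unfold Pre_ascii_to_char; infer_instance

def pvWitness_ascii_to_char : List String × Int := (["65$66$", "72$"], 0)

def Spec_ascii_to_char (lista : List String) (pssw : Int) (out : List (List String)) : Prop := out = ascii_to_char_alt lista pssw
instance (lista : List String) (pssw : Int) (out : List (List String)) : Decidable (Spec_ascii_to_char lista pssw out) := by unfold Spec_ascii_to_char; infer_instance

-- ===== CLAIM (what is proved, stated in full; the proofs are below) =====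
def Claim_equal_ascii_to_char : Prop := ∀ (lista : List String) (pssw : Int), Dom_ascii_to_char lista pssw → Pre_ascii_to_char lista pssw → Spec_ascii_to_char lista pssw (ascii_to_char lista pssw)

-- ===== LEMMAS AND PROOFS =====

theorem pv_foldl_app {α β : Type} (f : α → β) :
    ∀ (xs : List α) (acc : List β),
      xs.foldl (fun l x => l ++ [f x]) acc = acc ++ xs.map f := by
  intro xs
  induction xs with
  | nil => simp
  | cons x xs ih => intro acc; simp [List.foldl, ih]

theorem pv_phase1 (pssw : Int) :
    ∀ (lista : List String) (acc : List (List Int)),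
      (lista.foldl (fun (st : List (List Int) × List Int) (elemento : String) =>
          let lista_temp := ((PySem.Str.split? elemento "$").getD []).dropLast
          let listori := lista_temp.foldl
            (fun l numero => l ++ [((PySem.Int.ofStr? numero).getD 0) - pssw]) st.2
          (st.1 ++ [listori], ([] : List Int))) (acc, ([] : List Int))).1
      = acc ++ lista.map (fun e =>
          (((PySem.Str.split? e "$").getD []).dropLast).map
            (fun n => ((PySem.Int.ofStr? n).getD 0) - pssw)) := by
  intro lista
  induction lista with
  | nil => simp
  | cons e es ih =>
      intro acc
      simp only [List.foldl, List.map]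
      rw [pv_foldl_app (fun numero => ((PySem.Int.ofStr? numero).getD 0) - pssw)]
      rw [ih]
      simp

theorem ascii_to_char_eq_alt (lista : List String) (pssw : Int) :
    ascii_to_char lista pssw = ascii_to_char_alt lista pssw := by
  unfold ascii_to_char ascii_to_char_alt
  simp only
  rw [pv_phase1, List.nil_append,
      pv_foldl_app (fun mini : List Int =>
        mini.foldl (fun l number => l ++ [pvChr number.natAbs]) [])]
  simp only [List.nil_append, List.map_map]
  apply List.map_congr_left
  intro e _
  simp only [Function.comp]
  rw [pv_foldl_app (fun number : Int => pvChr number.natAbs)]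
  simp only [List.nil_append, List.map_map]
  rfl

-- ===== VERDICT (by name: the statement is the Claim_ definition above) =====
theorem ascii_to_char_spec : Claim_equal_ascii_to_char := by
  intro lista pssw _ _
  exact ascii_to_char_eq_alt lista pssw
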